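-- pv_equiv track=rewrite | github.com/KotisKotlyandii/lessons1 | ege22/152.py | f
-- ===== SOURCE A (Python) =====
-- def f(x):
--     L,M = 0,0
--     while x > 0:
--         M += 1
--         if x % 2 == 0:
--             L += x % 8
--         x //= 8
--     return L,M
-- ===== SOURCE B (Python) =====
-- def f(x):
--     if x <= 0:
--         return (0, 0)
--     s = oct(x)[2:]
--     return (sum(int(d) for d in s if int(d) % 2 == 0), len(s))
-- ===== Notes on version B (the rewrite author's own statement) =====
-- stated objective: idiomatic
-- what changed: Replaces the mutable while-loop over //8 and %8 with the octal string oct(x)[2:]: the length gives the digit count and a comprehension sums the even octal digits (x%2==0 iff the low octal digit is even).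
import Mathlib
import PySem

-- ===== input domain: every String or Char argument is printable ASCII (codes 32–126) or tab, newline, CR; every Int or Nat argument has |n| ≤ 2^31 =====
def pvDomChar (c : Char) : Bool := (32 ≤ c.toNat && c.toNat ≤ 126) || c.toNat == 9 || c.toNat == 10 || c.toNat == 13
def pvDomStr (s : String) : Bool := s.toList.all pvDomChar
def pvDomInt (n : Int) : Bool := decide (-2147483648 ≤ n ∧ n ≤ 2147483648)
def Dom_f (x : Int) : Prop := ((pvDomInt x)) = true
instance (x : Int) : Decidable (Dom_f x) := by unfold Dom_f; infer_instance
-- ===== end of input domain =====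

-- B replaces A's mutating while-loop with the octal-digit string: same values, idiomatic form.

-- ===== PORT A =====
-- the while loop of A, state (x, L, M)
def fLoop (x L M : Int) : Int × Int :=
  if h : x > 0 then
    fLoop (PySem.Int.floordiv x 8)
      (if PySem.Int.mod x 2 == 0 then L + PySem.Int.mod x 8 else L) (M + 1)
  else (L, M)
termination_by x.toNat
decreasing_by
  rw [PySem.Int.floordiv_eq_ediv_of_pos (by omega)]
  omega

def f (x : Int) : Int × Int := fLoop x 0 0

-- ===== PORT B =====
-- oct(x)[2:] as its list of octal digits, most significant first
def octDigits (n : Nat) : List Nat :=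
  if n = 0 then [] else octDigits (n / 8) ++ [n % 8]
termination_by n
decreasing_by omega

def f_alt (x : Int) : Int × Int :=
  if x ≤ 0 then (0, 0)
  else
    let s := octDigits x.toNat
    (((s.filter (fun d => d % 2 == 0)).map (fun d => (d : Int))).sum, (s.length : Int))

-- ===== PRECONDITION & SPEC =====
def Spec_f (x : Int) (out : Int × Int) : Prop := out = f_alt x
instance (x : Int) (out : Int × Int) : Decidable (Spec_f x out) := by unfold Spec_f; infer_instance

-- ===== CLAIM (what is proved, stated in full; the proofs are below) =====
def Claim_equal_f : Prop := ∀ (x : Int), Dom_f x → Spec_f x (f x)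

-- ===== LEMMAS AND PROOFS =====

def evenSum (n : Nat) : Int :=
  (((octDigits n).filter (fun d => d % 2 == 0)).map (fun d => (d : Int))).sum

lemma octDigits_pos {n : Nat} (h : n ≠ 0) :
    octDigits n = octDigits (n / 8) ++ [n % 8] := by
  rw [octDigits]; simp [h]

lemma evenSum_pos {n : Nat} (h : n ≠ 0) :
    evenSum n = evenSum (n / 8) + (if n % 2 = 0 then ((n % 8 : Nat) : Int) else 0) := by
  unfold evenSum
  rw [octDigits_pos h]
  have h2 : (n % 8) % 2 = n % 2 := Nat.mod_mod_of_dvd n (by norm_num)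
  by_cases he : n % 2 = 0 <;> simp [List.filter_append, he, h2]

lemma octLen_pos {n : Nat} (h : n ≠ 0) :
    (octDigits n).length = (octDigits (n / 8)).length + 1 := by
  rw [octDigits_pos h]; simp

lemma fLoop_eq (n : Nat) : ∀ (L M : Int),
    fLoop (n : Int) L M = (L + evenSum n, M + ((octDigits n).length : Int)) := by
  induction n using Nat.strong_induction_on with
  | _ n ih =>
    intro L M
    by_cases h0 : n = 0
    · subst h0
      rw [fLoop]
      simp [evenSum, octDigits]
    · rw [fLoop]
      have hpos : (0 : Int) < (n : Int) := by exact_mod_cast Nat.pos_of_ne_zero h0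
      rw [dif_pos hpos]
      have hd : PySem.Int.floordiv (n : Int) 8 = ((n / 8 : Nat) : Int) :=
        PySem.Int.floordiv_natCast n 8
      have hm8 : PySem.Int.mod (n : Int) 8 = ((n % 8 : Nat) : Int) :=
        PySem.Int.mod_natCast n 8
      have hm2 : PySem.Int.mod (n : Int) 2 = ((n % 2 : Nat) : Int) :=
        PySem.Int.mod_natCast n 2
      rw [hd, hm8, hm2, ih (n / 8) (Nat.div_lt_self (Nat.pos_of_ne_zero h0) (by norm_num))]
      rw [evenSum_pos h0, octLen_pos h0]
      simp only [Prod.mk.injEq, beq_iff_eq]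
      constructor
      · split_ifs with h1 h2 <;> push_cast at * <;> omega
      · push_cast; ring

-- ===== VERDICT (by name: the statement is the Claim_ definition above) =====
theorem f_spec : Claim_equal_f := by
  intro x _
  unfold Spec_f f f_alt
  by_cases hx : x ≤ 0
  · rw [fLoop]
    simp [hx, show ¬ x > 0 by omega]
  · have hx' : (x.toNat : Int) = x := Int.toNat_of_nonneg (by omega)
    have := fLoop_eq x.toNat 0 0
    rw [hx'] at this
    rw [this]
    simp [hx, evenSum]
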